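-- pv_equiv track=rewrite | github.com/ridingbytes/kaisho | kaisho/backends/markdown/__init__.py | _escape_body
-- ===== SOURCE A (Python) =====
-- def _escape_body(body: str, level: int) -> str:
--     """Escape heading markers in body text.
--
--     Prefixes lines starting with the section heading
--     marker (e.g. ``## ``) with a backslash so they
--     are not mistaken for new sections on re-read.
--     """
--     prefix = "#" * level + " "
--     lines = []
--     for line in body.split("\n"):
--         if line.startswith(prefix):
--             lines.append("\\" + line)
--         else:
--             lines.append(line)
--     return "\n".join(lines)
-- ===== SOURCE B (Python) =====
-- def _escape_body(body: str, level: int) -> str: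
--     """Single character scan with a line-start flag; tests the heading
--     prefix in place instead of splitting into lines and rejoining."""
--     prefix = "#" * level + " "
--     out = []
--     at_start = True
--     for i, c in enumerate(body):
--         if at_start and body.startswith(prefix, i):
--             out.append("\\")
--         out.append(c)
--         at_start = c == "\n"
--     return "".join(out)
-- ===== Notes on version B (the rewrite author's own statement) =====
-- stated objective: alternative
-- what changed: B replaces A's split('\n') / per-line startswith / join pipeline with a single character scan that carries a line-start flag and tests the heading prefix in place via str.startswith(prefix, i), never materialising a list of lines.
import Mathlib
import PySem

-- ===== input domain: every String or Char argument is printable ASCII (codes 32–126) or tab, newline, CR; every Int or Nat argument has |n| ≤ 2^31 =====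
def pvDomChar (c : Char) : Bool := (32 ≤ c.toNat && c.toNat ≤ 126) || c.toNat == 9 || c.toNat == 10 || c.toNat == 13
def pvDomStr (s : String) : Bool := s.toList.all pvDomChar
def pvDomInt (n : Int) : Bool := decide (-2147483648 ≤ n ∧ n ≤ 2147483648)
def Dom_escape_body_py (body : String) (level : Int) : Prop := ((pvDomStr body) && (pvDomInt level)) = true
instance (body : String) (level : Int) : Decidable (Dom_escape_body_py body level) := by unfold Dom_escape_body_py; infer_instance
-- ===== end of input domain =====

-- B replaces split("\n")/per-line startswith/join by one character scan with a line-start flag (alternative decomposition, same cost).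


-- ===== PORT A =====
-- prefix = "#" * level + " "   (negative level gives "", as in Python)
def pyHeadPrefix (level : Int) : List Char := List.replicate level.toNat '#' ++ [' ']

def escape_body_py (body : String) (level : Int) : String :=
  let pre := pyHeadPrefix level
  let lines := PySem.Chars.splitOn body.toList ['\n']
  let out := lines.foldl (fun acc line =>
      acc ++ [if PySem.Chars.startswith line pre then '\\' :: line else line]) []
  String.ofList (PySem.Chars.join ['\n'] out)

-- ===== PORT B =====
-- single scan: `atStart` says we are at a line start; prefix tested in place on the suffix
def escBodyScan (p : List Char) : Bool → List Char → List Char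
  | _, [] => []
  | atStart, c :: rest =>
      (if atStart && p.isPrefixOf (c :: rest) then ['\\'] else []) ++
        c :: escBodyScan p (c == '\n') rest

def escape_body_py_alt (body : String) (level : Int) : String :=
  String.ofList (escBodyScan (pyHeadPrefix level) true body.toList)

-- ===== PRECONDITION & SPEC =====
def Spec_escape_body_py (body : String) (level : Int) (out : String) : Prop := out = escape_body_py_alt body level
instance (body : String) (level : Int) (out : String) : Decidable (Spec_escape_body_py body level out) := by unfold Spec_escape_body_py; infer_instance

-- ===== CLAIM (what is proved, stated in full; the proofs are below) =====
def Claim_equal_escape_body_py : Prop := ∀ (body : String) (level : Int), Dom_escape_body_py body level → Spec_escape_body_py body level (escape_body_py body level)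

-- ===== LEMMAS AND PROOFS =====

/-- simple structural recursion computing split on '\n' -/
def splLines : List Char → List (List Char)
  | [] => [[]]
  | c :: cs =>
      if c = '\n' then [] :: splLines cs
      else (c :: (splLines cs).headI) :: (splLines cs).tail

theorem splLines_ne_nil (cs : List Char) : splLines cs ≠ [] := by
  cases cs with
  | nil => simp [splLines]
  | cons c cs => simp only [splLines]; split <;> simp

theorem go_nil_eq (fuel : Nat) (cur : List Char) (acc : List (List Char)) :
    PySem.Chars.splitOn.go ['\n'] (fuel + 1) [] cur acc = (cur.reverse :: acc).reverse := by
  rw [PySem.Chars.splitOn.go]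
  omega

theorem go_cons_eq (fuel : Nat) (c : Char) (rest cur : List Char) (acc : List (List Char)) :
    PySem.Chars.splitOn.go ['\n'] (fuel + 1) (c :: rest) cur acc
      = if c = '\n' then PySem.Chars.splitOn.go ['\n'] fuel rest [] (cur.reverse :: acc)
        else PySem.Chars.splitOn.go ['\n'] fuel rest (c :: cur) acc := by
  rw [PySem.Chars.splitOn.go]
  by_cases hc : c = '\n'
  · subst hc
    have hpre : ['\n'].isPrefixOf ('\n' :: rest) = true := by simp [List.isPrefixOf]
    simp [hpre]
  · have hpre : ['\n'].isPrefixOf (c :: rest) = false := by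
      simp [List.isPrefixOf]
      intro hcc
      exact absurd hcc.symm hc
    simp [hpre, hc]

theorem splitOn_go_eq (fuel : Nat) : ∀ (l cur : List Char) (acc : List (List Char)),
    l.length < fuel →
    PySem.Chars.splitOn.go ['\n'] fuel l cur.reverse acc
      = acc.reverse ++ ((cur ++ (splLines l).headI) :: (splLines l).tail) := by
  induction fuel with
  | zero => intro l cur acc h; omega
  | succ fuel ih =>
    intro l cur acc h
    cases l with
    | nil => rw [go_nil_eq]; simp [splLines]
    | cons c rest =>
        rw [go_cons_eq]
        have hfu : rest.length < fuel := by simp at h; omega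
        by_cases hc : c = '\n'
        · subst hc
          have hrec := ih rest [] (cur :: acc) hfu
          simp only [List.reverse_nil] at hrec
          simp only [if_true, List.reverse_reverse]
          rw [hrec]
          obtain ⟨x, xs, hx⟩ := List.exists_cons_of_ne_nil (splLines_ne_nil rest)
          simp [splLines, hx]
        · have hrec := ih rest (cur ++ [c]) acc hfu
          simp only [List.reverse_append, List.reverse_cons, List.reverse_nil,
            List.nil_append, List.singleton_append] at hrec
          simp only [hc, if_false]
          rw [hrec]
          simp [splLines, hc]

theorem splitOn_eq (cs : List Char) :
    PySem.Chars.splitOn cs ['\n'] = splLines cs := by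
  have h := splitOn_go_eq (cs.length + 1) cs [] [] (by omega)
  simp only [List.reverse_nil, List.nil_append] at h
  unfold PySem.Chars.splitOn
  rw [h]
  obtain ⟨x, xs, hx⟩ := List.exists_cons_of_ne_nil (splLines_ne_nil cs)
  simp [hx]

theorem headI_splLines (cs : List Char) :
    (splLines cs).headI = cs.takeWhile (fun c => c != '\n') := by
  induction cs with
  | nil => simp [splLines]
  | cons c cs ih =>
      simp only [splLines, List.takeWhile]
      by_cases h : c = '\n'
      · simp [h]
      · have hb : (c != '\n') = true := by simp [h]
        simp [h, hb, ih]

theorem isPrefixOf_takeWhile (p : List Char) (hnl : '\n' ∉ p) :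
    ∀ cs : List Char, p.isPrefixOf cs = p.isPrefixOf (cs.takeWhile (fun c => c != '\n')) := by
  induction p with
  | nil => intro cs; simp [List.isPrefixOf]
  | cons a p ih =>
      intro cs
      cases cs with
      | nil => simp [List.isPrefixOf]
      | cons c cs =>
          by_cases h : c = '\n'
          · subst h
            have ha : a ≠ '\n' := fun h => hnl (h ▸ List.mem_cons_self)
            simp [List.isPrefixOf, List.takeWhile, ha]
          · have : (c != '\n') = true := by simp [h]
            simp only [List.takeWhile, this, List.isPrefixOf]
            rw [ih (fun hm => hnl (List.mem_cons_of_mem _ hm)) cs]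

theorem startswith_eq_isPrefixOf (s p : List Char) :
    PySem.Chars.startswith s p = p.isPrefixOf s := by
  by_cases h : p <+: s
  · rw [(PySem.Chars.startswith_iff s p).mpr h, List.isPrefixOf_iff_prefix.mpr h]
  · have h1 : PySem.Chars.startswith s p = false := by
      rw [← Bool.not_eq_true]
      exact fun hh => h ((PySem.Chars.startswith_iff s p).mp hh)
    have h2 : p.isPrefixOf s = false := by
      rw [← Bool.not_eq_true]
      exact fun hh => h (List.isPrefixOf_iff_prefix.mp hh)
    rw [h1, h2]

theorem startswith_nil_false (p : List Char) (hp : p ≠ []) :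
    PySem.Chars.startswith [] p = false := by
  rw [startswith_eq_isPrefixOf]
  cases p with
  | nil => exact absurd rfl hp
  | cons a p => simp [List.isPrefixOf]

theorem join_append_head (y z : List Char) (L : List (List Char)) :
    PySem.Chars.join ['\n'] ((y ++ z) :: L) = y ++ PySem.Chars.join ['\n'] (z :: L) := by
  cases L with
  | nil => rw [PySem.Chars.join_singleton, PySem.Chars.join_singleton]
  | cons b m => rw [PySem.Chars.join_cons_cons, PySem.Chars.join_cons_cons]; simp

theorem scan_eq (p : List Char) (hp : p ≠ []) (hnl : '\n' ∉ p) :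
    ∀ cs : List Char,
      escBodyScan p true cs
        = PySem.Chars.join ['\n'] ((splLines cs).map
            (fun line => if PySem.Chars.startswith line p then '\\' :: line else line))
      ∧ escBodyScan p false cs
        = PySem.Chars.join ['\n'] ((splLines cs).headI ::
            (splLines cs).tail.map
            (fun line => if PySem.Chars.startswith line p then '\\' :: line else line)) := by
  intro cs
  induction cs with
  | nil =>
      constructor
      · simp [escBodyScan, splLines, startswith_nil_false p hp, PySem.Chars.join_singleton]
      · simp [escBodyScan, splLines, PySem.Chars.join_singleton]
  | cons c cs ih =>
      obtain ⟨ihT, ihF⟩ := ih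
      by_cases hc : c = '\n'
      · subst hc
        have hpfalse : p.isPrefixOf ('\n' :: cs) = false := by
          obtain ⟨a, p', hp'⟩ := List.exists_cons_of_ne_nil hp
          subst hp'
          have ha : (a == '\n') = false := by
            simp only [beq_eq_false_iff_ne, ne_eq]
            exact fun h => hnl (h ▸ List.mem_cons_self)
          simp [List.isPrefixOf, ha]
        obtain ⟨x, xs, hx⟩ := List.exists_cons_of_ne_nil (splLines_ne_nil cs)
        constructor
        · rw [show escBodyScan p true ('\n' :: cs)
              = '\n' :: escBodyScan p true cs from by simp [escBodyScan, hpfalse]]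
          rw [ihT]
          simp only [splLines, List.map_cons, hx]
          simp [startswith_nil_false p hp, PySem.Chars.join_cons_cons]
        · rw [show escBodyScan p false ('\n' :: cs)
              = '\n' :: escBodyScan p true cs from by simp [escBodyScan]]
          rw [ihT]
          simp only [splLines, List.headI_cons, List.tail_cons, hx]
          simp [PySem.Chars.join_cons_cons]
      · have hflag : (c == '\n') = false := by simp [hc]
        have key : PySem.Chars.startswith (c :: (splLines cs).headI) p
            = p.isPrefixOf (c :: cs) := by
          rw [startswith_eq_isPrefixOf, isPrefixOf_takeWhile p hnl (c :: cs)]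
          congr 1
          have hb : (c != '\n') = true := by simp [hc]
          simp [List.takeWhile, hb, headI_splLines]
        constructor
        · rw [show escBodyScan p true (c :: cs)
              = (if p.isPrefixOf (c :: cs) then ['\\'] else []) ++ c :: escBodyScan p false cs
              from by simp [escBodyScan, hflag]]
          rw [ihF]
          simp only [splLines, hc, if_false, List.map_cons, key]
          rw [show (if p.isPrefixOf (c :: cs) then '\\' :: c :: (splLines cs).headI
                else c :: (splLines cs).headI)
              = ((if p.isPrefixOf (c :: cs) then ['\\'] else []) ++ [c]) ++ (splLines cs).headI
              from by by_cases hb : p.isPrefixOf (c :: cs) <;> simp [hb]]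
          rw [join_append_head]
          simp
        · rw [show escBodyScan p false (c :: cs)
              = c :: escBodyScan p false cs from by simp [escBodyScan, hflag]]
          rw [ihF]
          simp only [splLines, hc, if_false, List.headI_cons, List.tail_cons]
          rw [show c :: (splLines cs).headI = [c] ++ (splLines cs).headI from rfl]
          rw [join_append_head]
          simp

-- ===== VERDICT (by name: the statement is the Claim_ definition above) =====
theorem escape_body_py_spec : Claim_equal_escape_body_py := by
  intro body level _
  unfold Spec_escape_body_py escape_body_py escape_body_py_alt
  have hp : pyHeadPrefix level ≠ [] := by simp [pyHeadPrefix]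
  have hnl : '\n' ∉ pyHeadPrefix level := by
    simp [pyHeadPrefix, List.mem_append, List.mem_replicate]
  dsimp only
  rw [PySem.List.foldl_append_singleton_eq_map, splitOn_eq,
    (scan_eq _ hp hnl body.toList).1]
  simp
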